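-- pv_equiv track=rewrite | github.com/dirm02/Contest | services/ship/output/ship/classifier.py | _best_amount_column
-- ===== SOURCE A (Python) =====
-- def _best_amount_column(columns: list[str]) -> str:
--     for candidate in (
--         "amount",
--         "agreement_value",
--         "total_all_funding",
--         "total_funding_known",
--         "supplier_amount",
--         "segment_total_amount",
--         "metric_value",
--         "count",
--     ):
--         if candidate in columns:
--             return candidate
--     return columns[0] if columns else "amount"
-- ===== SOURCE B (Python) =====
-- _PRIORITY = (
--     "amount",
--     "agreement_value",
--     "total_all_funding",
--     "total_funding_known",
--     "supplier_amount",
--     "segment_total_amount",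
--     "metric_value",
--     "count",
-- )
-- _RANK = {name: i for i, name in enumerate(_PRIORITY)}
--
--
-- def _best_amount_column(columns: list[str]) -> str:
--     best = None  # (rank, name) with the smallest rank seen so far
--     for col in columns:
--         r = _RANK.get(col)
--         if r is not None and (best is None or r < best[0]):
--             best = (r, col)
--     if best is not None:
--         return best[1]
--     return columns[0] if columns else "amount"
-- ===== Notes on version B (the rewrite author's own statement) =====
-- stated objective: alternative
-- what changed: B builds a rank dict from the fixed candidate tuple and makes a single pass over the input columns keeping the minimum-rank match, instead of A's scan over candidates with a membership test of columns for each.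
import Mathlib
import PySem

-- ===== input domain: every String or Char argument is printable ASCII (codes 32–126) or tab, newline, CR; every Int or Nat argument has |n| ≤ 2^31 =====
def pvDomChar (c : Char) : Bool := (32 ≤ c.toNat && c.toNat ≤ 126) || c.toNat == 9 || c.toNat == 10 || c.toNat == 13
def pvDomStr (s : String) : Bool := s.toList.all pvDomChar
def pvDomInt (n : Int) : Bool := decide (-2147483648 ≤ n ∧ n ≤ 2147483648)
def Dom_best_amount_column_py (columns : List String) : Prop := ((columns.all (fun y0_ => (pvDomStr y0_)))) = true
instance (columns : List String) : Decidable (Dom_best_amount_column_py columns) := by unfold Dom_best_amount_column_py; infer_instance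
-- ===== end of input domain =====

-- B replaces A's loop over the fixed candidate tuple (one membership scan of `columns` each)
-- by one pass over `columns` keeping the minimum-rank match from a rank dict (objective: alternative).

-- ===== PORT A =====
def best_amount_column_py (columns : List String) : String :=
  match ["amount", "agreement_value", "total_all_funding", "total_funding_known",
         "supplier_amount", "segment_total_amount", "metric_value",
         "count"].find? (fun candidate => columns.contains candidate) with
  | some candidate => candidate
  | none =>
    match columns with
    | [] => "amount"
    | c :: _ => c

-- ===== PORT B =====
-- _RANK = {name: i for i, name in enumerate(_PRIORITY)}
def pvRankDict : PySem.Dict String Int :=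
  PySem.Dict.mk [("amount", 0), ("agreement_value", 1), ("total_all_funding", 2),
                 ("total_funding_known", 3), ("supplier_amount", 4),
                 ("segment_total_amount", 5), ("metric_value", 6), ("count", 7)]

def pvBStep (best : Option (Int × String)) (col : String) : Option (Int × String) :=
  match PySem.Dict.get? pvRankDict col with
  | none => best
  | some r =>
    match best with
    | none => some (r, col)
    | some (br, _) => if r < br then some (r, col) else best

def best_amount_column_py_alt (columns : List String) : String :=
  match columns.foldl pvBStep none with
  | some (_, name) => name
  | none =>
    match columns with
    | [] => "amount"
    | c :: _ => c

-- ===== PRECONDITION & SPEC =====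
def Spec_best_amount_column_py (columns : List String) (out : String) : Prop := out = best_amount_column_py_alt columns
instance (columns : List String) (out : String) : Decidable (Spec_best_amount_column_py columns out) := by unfold Spec_best_amount_column_py; infer_instance

-- ===== CLAIM (what is proved, stated in full; the proofs are below) =====
def Claim_equal_best_amount_column_py : Prop := ∀ (columns : List String), Dom_best_amount_column_py columns → Spec_best_amount_column_py columns (best_amount_column_py columns)

-- ===== LEMMAS AND PROOFS =====

-- minimum-rank bookkeeping abstracted to Option Int
def pvMinO (a b : Option Int) : Option Int :=
  match a, b with
  | none, b => b
  | a, none => a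
  | some x, some y => some (if y < x then y else x)

def pvMinStep (a : Option Int) (c : String) : Option Int :=
  pvMinO a (PySem.Dict.get? pvRankDict c)

-- name of the candidate at each rank
def pvName (k : Int) : String :=
  if k = 0 then "amount" else if k = 1 then "agreement_value"
  else if k = 2 then "total_all_funding" else if k = 3 then "total_funding_known"
  else if k = 4 then "supplier_amount" else if k = 5 then "segment_total_amount"
  else if k = 6 then "metric_value" else "count"

-- rank of the first (lowest-rank) candidate present in cols
def pvFirst (cols : List String) : Option Int :=
  if cols.contains "amount" then some 0
  else if cols.contains "agreement_value" then some 1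
  else if cols.contains "total_all_funding" then some 2
  else if cols.contains "total_funding_known" then some 3
  else if cols.contains "supplier_amount" then some 4
  else if cols.contains "segment_total_amount" then some 5
  else if cols.contains "metric_value" then some 6
  else if cols.contains "count" then some 7
  else none

theorem pvMinO_none_left (b : Option Int) : pvMinO none b = b := by cases b <;> rfl

theorem pvMinO_assoc (a b c : Option Int) : pvMinO (pvMinO a b) c = pvMinO a (pvMinO b c) := by
  cases a <;> cases b <;> cases c <;> simp [pvMinO] <;> omega

theorem pv_rank_name (c : String) (r : Int) (h : PySem.Dict.get? pvRankDict c = some r) :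
    c = pvName r := by
  simp only [pvRankDict, PySem.Dict.get?_mk_cons, beq_iff_eq] at h
  have hemp : (PySem.Dict.mk ([] : List (String × Int))).get? c = none := rfl
  rw [hemp] at h
  split_ifs at h <;>
    (cases h; simp only [pvName]; norm_num; symm; assumption)

theorem pv_step_map (a : Option Int) (c : String) :
    pvBStep (a.map (fun k => (k, pvName k))) c =
      (pvMinStep a c).map (fun k => (k, pvName k)) := by
  unfold pvBStep pvMinStep pvMinO
  cases hr : PySem.Dict.get? pvRankDict c with
  | none => cases a <;> rfl
  | some r =>
    have hc := pv_rank_name c r hr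
    cases a with
    | none => simp [hc]
    | some b => by_cases h : r < b <;> simp [h, hc]

theorem pv_fold_map (cols : List String) (a : Option Int) :
    cols.foldl pvBStep (a.map (fun k => (k, pvName k))) =
      (cols.foldl pvMinStep a).map (fun k => (k, pvName k)) := by
  induction cols generalizing a with
  | nil => rfl
  | cons c cs ih => simp only [List.foldl_cons, pv_step_map, ih]

theorem pv_fold_min_gen (cols : List String) (a : Option Int) :
    cols.foldl pvMinStep a = pvMinO a (cols.foldl pvMinStep none) := by
  induction cols generalizing a with
  | nil => cases a <;> rfl
  | cons c cs ih =>
    simp only [List.foldl_cons]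
    rw [ih (pvMinStep a c), ih (pvMinStep none c)]
    simp only [pvMinStep, pvMinO_none_left, pvMinO_assoc]

theorem pv_first_cons0 (cs : List String) :
    pvFirst ("amount" :: cs) = pvMinO (some 0) (pvFirst cs) := by
  simp only [pvFirst, List.contains_cons]
  simp
  split_ifs <;> decide

theorem pv_first_cons1 (cs : List String) :
    pvFirst ("agreement_value" :: cs) = pvMinO (some 1) (pvFirst cs) := by
  simp only [pvFirst, List.contains_cons]
  simp
  split_ifs <;> decide

theorem pv_first_cons2 (cs : List String) :
    pvFirst ("total_all_funding" :: cs) = pvMinO (some 2) (pvFirst cs) := by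
  simp only [pvFirst, List.contains_cons]
  simp
  split_ifs <;> decide

theorem pv_first_cons3 (cs : List String) :
    pvFirst ("total_funding_known" :: cs) = pvMinO (some 3) (pvFirst cs) := by
  simp only [pvFirst, List.contains_cons]
  simp
  split_ifs <;> decide

theorem pv_first_cons4 (cs : List String) :
    pvFirst ("supplier_amount" :: cs) = pvMinO (some 4) (pvFirst cs) := by
  simp only [pvFirst, List.contains_cons]
  simp
  split_ifs <;> decide

theorem pv_first_cons5 (cs : List String) :
    pvFirst ("segment_total_amount" :: cs) = pvMinO (some 5) (pvFirst cs) := by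
  simp only [pvFirst, List.contains_cons]
  simp
  split_ifs <;> decide

theorem pv_first_cons6 (cs : List String) :
    pvFirst ("metric_value" :: cs) = pvMinO (some 6) (pvFirst cs) := by
  simp only [pvFirst, List.contains_cons]
  simp
  split_ifs <;> decide

theorem pv_first_cons7 (cs : List String) :
    pvFirst ("count" :: cs) = pvMinO (some 7) (pvFirst cs) := by
  simp only [pvFirst, List.contains_cons]
  simp
  split_ifs <;> decide

theorem pv_first_cons (c : String) (cs : List String) :
    pvFirst (c :: cs) = pvMinO (PySem.Dict.get? pvRankDict c) (pvFirst cs) := by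
  by_cases h0 : c = "amount"
  · subst h0
    rw [(by decide : PySem.Dict.get? pvRankDict "amount" = some 0)]
    exact pv_first_cons0 cs
  by_cases h1 : c = "agreement_value"
  · subst h1
    rw [(by decide : PySem.Dict.get? pvRankDict "agreement_value" = some 1)]
    exact pv_first_cons1 cs
  by_cases h2 : c = "total_all_funding"
  · subst h2
    rw [(by decide : PySem.Dict.get? pvRankDict "total_all_funding" = some 2)]
    exact pv_first_cons2 cs
  by_cases h3 : c = "total_funding_known"
  · subst h3
    rw [(by decide : PySem.Dict.get? pvRankDict "total_funding_known" = some 3)]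
    exact pv_first_cons3 cs
  by_cases h4 : c = "supplier_amount"
  · subst h4
    rw [(by decide : PySem.Dict.get? pvRankDict "supplier_amount" = some 4)]
    exact pv_first_cons4 cs
  by_cases h5 : c = "segment_total_amount"
  · subst h5
    rw [(by decide : PySem.Dict.get? pvRankDict "segment_total_amount" = some 5)]
    exact pv_first_cons5 cs
  by_cases h6 : c = "metric_value"
  · subst h6
    rw [(by decide : PySem.Dict.get? pvRankDict "metric_value" = some 6)]
    exact pv_first_cons6 cs
  by_cases h7 : c = "count"
  · subst h7
    rw [(by decide : PySem.Dict.get? pvRankDict "count" = some 7)]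
    exact pv_first_cons7 cs
  have e0 : (("amount" : String) == c) = false := beq_eq_false_iff_ne.mpr (Ne.symm h0)
  have e1 : (("agreement_value" : String) == c) = false := beq_eq_false_iff_ne.mpr (Ne.symm h1)
  have e2 : (("total_all_funding" : String) == c) = false := beq_eq_false_iff_ne.mpr (Ne.symm h2)
  have e3 : (("total_funding_known" : String) == c) = false := beq_eq_false_iff_ne.mpr (Ne.symm h3)
  have e4 : (("supplier_amount" : String) == c) = false := beq_eq_false_iff_ne.mpr (Ne.symm h4)
  have e5 : (("segment_total_amount" : String) == c) = false := beq_eq_false_iff_ne.mpr (Ne.symm h5)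
  have e6 : (("metric_value" : String) == c) = false := beq_eq_false_iff_ne.mpr (Ne.symm h6)
  have e7 : (("count" : String) == c) = false := beq_eq_false_iff_ne.mpr (Ne.symm h7)
  have hr : PySem.Dict.get? pvRankDict c = none := by
    simp only [pvRankDict, PySem.Dict.get?_mk_cons, e0, e1, e2, e3, e4, e5, e6, e7]
    rfl
  rw [hr, pvMinO_none_left]
  simp only [pvFirst, List.contains_cons, e0, e1, e2, e3, e4, e5, e6, e7, Bool.false_or]

theorem pv_fold_eq_first (cols : List String) :
    cols.foldl pvMinStep none = pvFirst cols := by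
  induction cols with
  | nil => rfl
  | cons c cs ih =>
    rw [List.foldl_cons, pv_fold_min_gen, ih]
    have : pvMinStep none c = PySem.Dict.get? pvRankDict c := by
      unfold pvMinStep; exact pvMinO_none_left _
    rw [this, pv_first_cons]

theorem pv_A_eq_first (cols : List String) :
    (["amount", "agreement_value", "total_all_funding", "total_funding_known",
      "supplier_amount", "segment_total_amount", "metric_value",
      "count"].find? (fun candidate => cols.contains candidate)) =
      (pvFirst cols).map pvName := by
  simp only [pvFirst]
  split_ifs <;> simp_all [List.find?, pvName]

-- ===== VERDICT (by name: the statement is the Claim_ definition above) =====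
theorem best_amount_column_py_spec : Claim_equal_best_amount_column_py := by
  intro cols _
  unfold Spec_best_amount_column_py best_amount_column_py best_amount_column_py_alt
  have hB : cols.foldl pvBStep none = (pvFirst cols).map (fun k => (k, pvName k)) := by
    have h := pv_fold_map cols none
    rw [pv_fold_eq_first] at h
    exact h
  rw [hB, pv_A_eq_first]
  cases pvFirst cols <;> rfl
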